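-- pv_equiv track=rewrite | github.com/tldms0327/Algorithm | 백준/1477_휴게소세우기.py | solution
-- ===== SOURCE A (Python) =====
-- import heapq
-- from math import ceil
--
-- def solution(n, m, l, d):
--     d.sort()
--     dist = [d[0], l - d[-1]]
--     for i in range(len(d) - 1):
--         dist.append(d[i + 1] - d[i])
--
--     hq = [[-1 * i, -1 * i, 1] for i in dist]
--     heapq.heapify(hq)
--
--     while m > 0:
--         # dist_value는 현재 휴개소가 없는 가장 긴 거리,
--         # origin_dist는 휴게소를 새로 짓기 전의 거리,
--         # divider는 원래 거리에서 몇 번 나뉘었는지 저장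
--         dist_value, origin_dist, divider = heapq.heappop(hq)
--         # 휴게소는 정수에만 세울 수 있으므로 ceil
--         divider += 1
--         new_dist_value = ceil(-1 * origin_dist / divider)
--         heapq.heappush(hq, [-1 * new_dist_value, origin_dist, divider])
--
--         m -= 1
--
--     return -1 * heapq.heappop(hq)[0]
-- ===== SOURCE B (Python) =====
-- def solution(n, m, l, d):
--     # Binary search on the answer g = minimal achievable maximum gap:
--     # a gap of length g0 needs ceil(g0/g)-1 = (g0-1)//g rest stops to be cut
--     # into pieces of length <= g.  (A sorts d in place; B leaves d untouched.)
--     s = sorted(d)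
--     gaps = [s[0], l - s[-1]] + [s[i + 1] - s[i] for i in range(len(s) - 1)]
--     stops = max(m, 0)
--     lo, hi = 1, max(gaps)
--     while lo < hi:
--         mid = (lo + hi) // 2
--         if sum((g - 1) // mid for g in gaps if g >= 1) <= stops:
--             hi = mid
--         else:
--             lo = mid + 1
--     return lo
-- ===== Notes on version B (the rewrite author's own statement) =====
-- stated objective: faster
-- what changed: Replaces A's heap greedy (m rounds of pop-the-largest-gap-and-split) by a binary search on the answer value g, counting the (g0-1)//g stops each gap needs; no heap and no per-stop loop.
-- outside the precondition, e.g. on solution(1, 3, -5, [-2]): A returns 0, B returns 1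
import Mathlib
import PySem

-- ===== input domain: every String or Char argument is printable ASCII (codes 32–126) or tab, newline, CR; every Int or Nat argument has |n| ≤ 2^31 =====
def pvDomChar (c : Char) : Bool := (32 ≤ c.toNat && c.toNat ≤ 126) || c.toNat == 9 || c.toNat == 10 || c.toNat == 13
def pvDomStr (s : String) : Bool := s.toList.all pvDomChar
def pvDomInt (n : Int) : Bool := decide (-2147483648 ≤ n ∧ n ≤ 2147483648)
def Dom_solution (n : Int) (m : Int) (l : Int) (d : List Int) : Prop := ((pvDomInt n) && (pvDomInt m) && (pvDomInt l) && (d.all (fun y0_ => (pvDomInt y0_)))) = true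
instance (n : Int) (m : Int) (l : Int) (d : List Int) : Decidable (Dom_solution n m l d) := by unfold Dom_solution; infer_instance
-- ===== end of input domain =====

-- B replaces A's heap greedy by a binary search on the answer; equivalence is about the
-- RETURN value only: A sorts the list d in place, B does not mutate it.

-- ===== PORT A =====
-- heap entries are Python 3-lists [-dist, -origin, divider], always length 3: ported as Int triples,
-- compared by pvELt = Python's lexicographic list comparison (exact for 3-lists of ints)
def pvELt (a b : Int × Int × Int) : Bool :=
  decide (a.1 < b.1) ||
    (a.1 == b.1 && (decide (a.2.1 < b.2.1) ||
      (a.2.1 == b.2.1 && decide (a.2.2 < b.2.2))))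

def pvE0 : Int × Int × Int := (0, 0, 0)

-- heapq._siftdown(heap, startpos, pos) main while-loop (newitem = heap[pos] read once before it)
def pvSiftdownLoop (newitem : Int × Int × Int) (heap : List (Int × Int × Int))
    (startpos pos : Nat) : List (Int × Int × Int) :=
  if _h : startpos < pos then
    let parentpos := (pos - 1) / 2
    let parent := heap.getD parentpos pvE0
    if pvELt newitem parent then
      pvSiftdownLoop newitem (heap.set pos parent) startpos parentpos
    else heap.set pos newitem
  else heap.set pos newitem
  termination_by pos
  decreasing_by omega

-- heapq._siftdown
def pvSiftdown (heap : List (Int × Int × Int)) (startpos pos : Nat) : List (Int × Int × Int) :=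
  pvSiftdownLoop (heap.getD pos pvE0) heap startpos pos

-- heapq._siftup(heap, pos) while-loop; state (pos, childpos), childpos = 2*pos+1 at entry
def pvSiftupLoop (heap : List (Int × Int × Int)) (endpos startpos pos childpos : Nat)
    (newitem : Int × Int × Int) : List (Int × Int × Int) :=
  if _h : childpos < endpos then
    let rightpos := childpos + 1
    let childpos' := if rightpos < endpos &&
        !(pvELt (heap.getD childpos pvE0) (heap.getD rightpos pvE0)) then rightpos else childpos
    pvSiftupLoop (heap.set pos (heap.getD childpos' pvE0)) endpos startpos childpos'
      (2 * childpos' + 1) newitem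
  else
    pvSiftdown (heap.set pos newitem) startpos pos
  termination_by endpos - childpos
  decreasing_by split <;> omega

-- heapq._siftup
def pvSiftup (heap : List (Int × Int × Int)) (pos : Nat) : List (Int × Int × Int) :=
  pvSiftupLoop heap heap.length pos pos (2 * pos + 1) (heap.getD pos pvE0)

-- heapq.heapify: for i in reversed(range(n//2)): _siftup(x, i)
def pvHeapify (heap : List (Int × Int × Int)) : List (Int × Int × Int) :=
  ((List.range (heap.length / 2)).reverse).foldl (fun h i => pvSiftup h i) heap

-- heapq.heappush
def pvHeappush (heap : List (Int × Int × Int)) (item : Int × Int × Int) :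
    List (Int × Int × Int) :=
  pvSiftdown (heap ++ [item]) 0 heap.length

-- heapq.heappop (never called on an empty heap in this program)
def pvHeappop (heap : List (Int × Int × Int)) :
    (Int × Int × Int) × List (Int × Int × Int) :=
  let lastelt := heap.getLastD pvE0
  let rest := heap.dropLast
  if rest.isEmpty then (lastelt, [])
  else (rest.getD 0 pvE0, pvSiftup (rest.set 0 lastelt) 0)

-- the 'while m > 0' loop of A (fuel = m.toNat: the loop runs exactly m times for m > 0)
def pvLoopA : Nat → List (Int × Int × Int) → List (Int × Int × Int)
  | 0, hq => hq
  | Nat.succ f, hq =>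
    let p := pvHeappop hq
    let od := p.1.2.1
    let divider := p.1.2.2 + 1
    -- new_dist_value = ceil((-1*origin)/divider): math.ceil of the float quotient is the exact
    -- ceiling here (|values| ≤ 2^33 ≪ 2^53, divider ≥ 1), ported as -((-x) // divider)
    let nd := -(PySem.Int.floordiv (-(-1 * od)) divider)
    pvLoopA f (pvHeappush p.2 (-1 * nd, od, divider))

def solution (n : Int) (m : Int) (l : Int) (d : List Int) : Int :=
  let ds := PySem.List.sorted d (fun x => x) false
  -- d[0] and d[-1]: exact for d ≠ [] (Pre_; Python raises IndexError on d = [])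
  let dist := (List.range (ds.length - 1)).foldl
    (fun acc i => acc ++ [ds.getD (i + 1) 0 - ds.getD i 0])
    [ds.headD 0, l - ds.getLastD 0]
  let hq := pvHeapify (dist.map (fun i => (-1 * i, -1 * i, (1 : Int))));
  -1 * (pvHeappop (pvLoopA m.toNat hq)).1.1

-- ===== PORT B =====
-- sum((g - 1) // mid for g in gaps if g >= 1)
def pvNeeded (gaps : List Int) (mid : Int) : Int :=
  (gaps.filter (fun g => decide (1 ≤ g))).foldl
    (fun acc g => acc + PySem.Int.floordiv (g - 1) mid) 0

-- the 'while lo < hi' binary-search loop of B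
def pvBS (stops : Int) (gaps : List Int) (lo hi : Int) : Int :=
  if _h : lo < hi then
    let mid := PySem.Int.floordiv (lo + hi) 2
    if pvNeeded gaps mid ≤ stops then pvBS stops gaps lo mid
    else pvBS stops gaps (mid + 1) hi
  else lo
  termination_by (hi - lo).toNat
  decreasing_by
    · have := PySem.Int.floordiv_two_mid_bounds (le_of_lt _h)
      have hlt : PySem.Int.floordiv (lo + hi) 2 < hi := by
        rw [PySem.Int.floordiv_lt_iff_lt_mul (by omega)]; omega
      omega
    · have := PySem.Int.floordiv_two_mid_bounds (le_of_lt _h)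
      omega

def solution_alt (n : Int) (m : Int) (l : Int) (d : List Int) : Int :=
  let s := PySem.List.sorted d (fun x => x) false
  -- s[0] and s[-1]: exact for d ≠ [] (Pre_; Python raises IndexError on d = [])
  let gaps := [s.headD 0, l - s.getLastD 0] ++
    (List.range (s.length - 1)).map (fun i => s.getD (i + 1) 0 - s.getD i 0)
  let stops := max m 0
  let hi := (PySem.List.max? gaps (fun x => x)).getD 0
  pvBS stops gaps 1 hi

-- ===== PRECONDITION & SPEC =====
-- the gap list of the problem (for stating Pre_ only; the ports build it themselves)
def pvGaps (l : Int) (d : List Int) : List Int :=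
  let s := PySem.List.sorted d (fun x => x) false
  [s.headD 0, l - s.getLastD 0] ++
    (List.range (s.length - 1)).map (fun i => s.getD (i + 1) 0 - s.getD i 0)

def pvMaxGap (l : Int) (d : List Int) : Int :=
  match pvGaps l d with
  | [] => 0
  | g :: t => t.foldl max g

-- Pre_ excludes the empty list d (A raises IndexError on d[0]) and inputs whose largest
-- segment is ≤ 0 (all stations equal, at a position ≤ 0 and ≥ l) — such inputs violate the
-- problem's premise 0 < d_i < l and neither program's value there is more defensible than
-- the other's (A keeps "splitting" non-positive segments, B has nothing to search).
def Pre_solution (n : Int) (m : Int) (l : Int) (d : List Int) : Prop :=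
  d ≠ [] ∧ 1 ≤ pvMaxGap l d
instance (n : Int) (m : Int) (l : Int) (d : List Int) : Decidable (Pre_solution n m l d) := by
  unfold Pre_solution; infer_instance

def pvWitness_solution : Int × Int × Int × List Int := (4, 1, 10, [3])

def Spec_solution (n : Int) (m : Int) (l : Int) (d : List Int) (out : Int) : Prop :=
  out = solution_alt n m l d
instance (n : Int) (m : Int) (l : Int) (d : List Int) (out : Int) :
    Decidable (Spec_solution n m l d out) := by unfold Spec_solution; infer_instance

-- ===== CLAIM (what is proved, stated in full; the proofs are below) =====
def Claim_equal_solution : Prop := ∀ (n : Int) (m : Int) (l : Int) (d : List Int),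
  Dom_solution n m l d → Pre_solution n m l d → Spec_solution n m l d (solution n m l d)

-- ===== LEMMAS AND PROOFS =====
-- Layer 1: order on entries, tree indices, multiset of set
def pvLe (a b : Int × Int × Int) : Prop := pvELt b a = false

theorem pvLe_refl (a : Int × Int × Int) : pvLe a a := by
  simp [pvLe, pvELt]

theorem pvLe_of_lt {a b : Int × Int × Int} (h : pvELt a b = true) : pvLe a b := by
  obtain ⟨a1, a2, a3⟩ := a; obtain ⟨b1, b2, b3⟩ := b
  simp only [pvLe, pvELt] at *
  simp only [Bool.or_eq_true, Bool.and_eq_true, decide_eq_true_eq, beq_iff_eq] at h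
  simp only [Bool.or_eq_false_iff, Bool.and_eq_false_iff, decide_eq_false_iff_not, beq_eq_false_iff_ne]
  omega

theorem pvLe_trans {a b c : Int × Int × Int} (h1 : pvLe a b) (h2 : pvLe b c) : pvLe a c := by
  obtain ⟨a1, a2, a3⟩ := a; obtain ⟨b1, b2, b3⟩ := b; obtain ⟨c1, c2, c3⟩ := c
  simp only [pvLe, pvELt] at *
  simp only [Bool.or_eq_false_iff, Bool.and_eq_false_iff, decide_eq_false_iff_not,
    beq_eq_false_iff_ne] at *
  omega

theorem pvLe_fst {a b : Int × Int × Int} (h : pvLe a b) : a.1 ≤ b.1 := by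
  obtain ⟨a1, a2, a3⟩ := a; obtain ⟨b1, b2, b3⟩ := b
  simp only [pvLe, pvELt, Bool.or_eq_false_iff, Bool.and_eq_false_iff,
    decide_eq_false_iff_not, beq_eq_false_iff_ne] at h
  rcases h with ⟨h1, _⟩; omega

-- parent index
def pvPar (j : Nat) : Nat := (j - 1) / 2

theorem pvPar_lt {j : Nat} (h : 1 ≤ j) : pvPar j < j := by unfold pvPar; omega

theorem pvPar_child_iff {i j : Nat} (h : pvPar j = i) (hj : 1 ≤ j) :
    j = 2 * i + 1 ∨ j = 2 * i + 2 := by unfold pvPar at h; omega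

theorem pvPar_child_ge {i j : Nat} (h : pvPar j = i) (hj : 1 ≤ j) : 2 * i + 1 ≤ j := by
  unfold pvPar at h; omega

def pvDesc (r j : Nat) : Prop := ∃ t, pvPar^[t] j = r

theorem pvDesc_refl (r : Nat) : pvDesc r r := ⟨0, rfl⟩

theorem pvDesc_par {r j : Nat} (h : pvDesc r j) (hne : j ≠ r) : pvDesc r (pvPar j) := by
  obtain ⟨t, ht⟩ := h
  cases t with
  | zero => exact absurd ht hne
  | succ t => exact ⟨t, by rw [← ht, Function.iterate_succ_apply]⟩

theorem pvDesc_le {r j : Nat} (h : pvDesc r j) : r ≤ j := by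
  obtain ⟨t, ht⟩ := h
  induction t generalizing j with
  | zero => simp at ht; omega
  | succ t ih =>
    rw [Function.iterate_succ_apply] at ht
    have := ih ht
    have : pvPar j ≤ j := by unfold pvPar; omega
    omega

theorem pvDesc_child {r j : Nat} (h : pvDesc r (pvPar j)) : pvDesc r j := by
  obtain ⟨t, ht⟩ := h
  exact ⟨t + 1, by rw [Function.iterate_succ_apply]; exact ht⟩

theorem pvDesc_zero (j : Nat) : pvDesc 0 j := by
  induction j using Nat.strong_induction_on with
  | _ j ih =>
    rcases Nat.eq_zero_or_pos j with h | h
    · exact h ▸ pvDesc_refl 0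
    · exact pvDesc_child (ih (pvPar j) (pvPar_lt h))

theorem pvDesc_trans {a b c : Nat} (h1 : pvDesc a b) (h2 : pvDesc b c) : pvDesc a c := by
  obtain ⟨s, hs⟩ := h1; obtain ⟨t, ht⟩ := h2
  exact ⟨s + t, by rw [Function.iterate_add_apply, ht, hs]⟩

theorem pvDesc_comparable {a b j : Nat} (h1 : pvDesc a j) (h2 : pvDesc b j) :
    pvDesc a b ∨ pvDesc b a := by
  obtain ⟨s, hs⟩ := h1; obtain ⟨t, ht⟩ := h2
  rcases Nat.le_total s t with h | h
  · right; refine ⟨t - s, ?_⟩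
    rw [← hs, ← Function.iterate_add_apply, Nat.sub_add_cancel h, ht]
  · left; refine ⟨s - t, ?_⟩
    rw [← ht, ← Function.iterate_add_apply, Nat.sub_add_cancel h, hs]

theorem pvDesc_split {i j : Nat} (h : pvDesc i j) (hne : j ≠ i) :
    pvDesc (2 * i + 1) j ∨ pvDesc (2 * i + 2) j := by
  induction j using Nat.strong_induction_on with
  | _ j ih =>
    have hj1 : 1 ≤ j := by
      rcases Nat.eq_zero_or_pos j with h0 | h0
      · exfalso; have := pvDesc_le h; omega
      · exact h0
    by_cases hpj : pvPar j = i
    · rcases pvPar_child_iff hpj hj1 with hc | hc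
      · left; exact hc ▸ pvDesc_refl _
      · right; exact hc ▸ pvDesc_refl _
    · rcases ih (pvPar j) (pvPar_lt hj1) (pvDesc_par h hne) hpj with hc | hc
      · exact Or.inl (pvDesc_child hc)
      · exact Or.inr (pvDesc_child hc)

-- multiset of a List.set
theorem pvMsetSet {α : Type} [DecidableEq α] (h : List α) (i : Nat) (x d : α)
    (hi : i < h.length) :
    (↑(h.set i x) : Multiset α) + {h.getD i d} = (↑h : Multiset α) + {x} := by
  induction h generalizing i with
  | nil => simp at hi
  | cons a t ih =>
    cases i with
    | zero =>
      simp only [List.set, List.getD_cons_zero]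
      show (x ::ₘ (↑t : Multiset α)) + {a} = (a ::ₘ (↑t : Multiset α)) + {x}
      rw [← Multiset.singleton_add, ← Multiset.singleton_add]
      abel
    | succ i =>
      simp only [List.set, List.getD_cons_succ]
      show (a ::ₘ (↑(t.set i x) : Multiset α)) + {t.getD i d} =
        (a ::ₘ (↑t : Multiset α)) + {x}
      rw [Multiset.cons_add, Multiset.cons_add, ih i (by simpa using hi)]
-- Layer 2: heap edges and the _siftdown loop specification
abbrev pvE : Type := Int × Int × Int

def pvEdge (h : List pvE) (j : Nat) : Prop :=
  pvLe (h.getD (pvPar j) pvE0) (h.getD j pvE0)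

def pvIsHeap (h : List pvE) : Prop := ∀ j, 1 ≤ j → j < h.length → pvEdge h j

theorem pvGetDSetNe (h : List pvE) (i j : Nat) (x : pvE) (hne : j ≠ i) :
    (h.set i x).getD j pvE0 = h.getD j pvE0 := by
  rw [List.getD_eq_getElem?_getD, List.getD_eq_getElem?_getD,
    List.getElem?_set_ne (by omega)]

theorem pvGetDSetEq (h : List pvE) (i : Nat) (x : pvE) (hi : i < h.length) :
    (h.set i x).getD i pvE0 = x := by
  rw [List.getD_eq_getElem?_getD, List.getElem?_set_self hi]; rfl

theorem pvNotDescParSelf {r : Nat} (hr : 1 ≤ r) : ¬ pvDesc r (pvPar r) := by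
  intro h
  have h1 := pvDesc_le h
  have h2 := pvPar_lt hr
  omega

theorem pvSdLoop_eq (newitem : pvE) (h : List pvE) (r pos : Nat) :
    pvSiftdownLoop newitem h r pos =
      if r < pos then
        (if pvELt newitem (h.getD (pvPar pos) pvE0) then
          pvSiftdownLoop newitem (h.set pos (h.getD (pvPar pos) pvE0)) r (pvPar pos)
        else h.set pos newitem)
      else h.set pos newitem := by
  rw [pvSiftdownLoop]
  rfl

theorem pvSdLoop_spec : ∀ (pos : Nat) (newitem : pvE) (h : List pvE) (r : Nat),
    pos < h.length → pvDesc r pos →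
    (∀ j, 1 ≤ j → j < h.length → pvDesc r (pvPar j) → pvPar j ≠ pos → j ≠ pos →
      pvEdge h j) →
    (∀ j, 1 ≤ j → j < h.length → pvPar j = pos → pvLe newitem (h.getD j pvE0)) →
    (pos ≠ r → ∀ j, 1 ≤ j → j < h.length → pvPar j = pos →
      pvLe (h.getD (pvPar pos) pvE0) (h.getD j pvE0)) →
    (pvSiftdownLoop newitem h r pos).length = h.length ∧
    (↑(pvSiftdownLoop newitem h r pos) : Multiset pvE) + {h.getD pos pvE0} =
      (↑h : Multiset pvE) + {newitem} ∧
    (∀ j, ¬ pvDesc r j → (pvSiftdownLoop newitem h r pos).getD j pvE0 = h.getD j pvE0) ∧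
    (∀ j, 1 ≤ j → j < h.length → pvDesc r (pvPar j) →
      pvEdge (pvSiftdownLoop newitem h r pos) j) := by
  intro pos
  induction pos using Nat.strong_induction_on with
  | _ pos ih =>
  intro newitem h r hlen hdesc hC1 hC2a hC2b
  by_cases hrp : r < pos
  · rw [pvSdLoop_eq, if_pos hrp]
    have hpplt : pvPar pos < pos := pvPar_lt (by omega)
    set parent := h.getD (pvPar pos) pvE0 with hpar
    by_cases hlt : pvELt newitem parent = true
    · rw [if_pos hlt]
      set h' := h.set pos parent with hh'
      have hlen' : h'.length = h.length := List.length_set ..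
      have hget' : ∀ j, j ≠ pos → h'.getD j pvE0 = h.getD j pvE0 := fun j hj =>
        pvGetDSetNe h pos j parent hj
      have hgetp : h'.getD pos pvE0 = parent := pvGetDSetEq h pos parent hlen
      have hdesc' : pvDesc r (pvPar pos) := pvDesc_par hdesc (by omega)
      have hC1' : ∀ j, 1 ≤ j → j < h'.length → pvDesc r (pvPar j) → pvPar j ≠ pvPar pos →
          j ≠ pvPar pos → pvEdge h' j := by
        intro j hj1 hjl hjd hjp1 hjp2
        rw [hlen'] at hjl
        unfold pvEdge
        by_cases hjpos : j = pos
        · exact absurd (by rw [hjpos]) hjp1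
        by_cases hpjpos : pvPar j = pos
        · rw [hget' j hjpos, hpjpos, pvGetDSetEq _ _ _ hlen]
          exact hC2b (by omega) j hj1 hjl hpjpos
        · rw [hget' j hjpos, hget' (pvPar j) hpjpos]
          exact hC1 j hj1 hjl hjd hpjpos hjpos
      have hC2a' : ∀ j, 1 ≤ j → j < h'.length → pvPar j = pvPar pos →
          pvLe newitem (h'.getD j pvE0) := by
        intro j hj1 hjl hjp
        rw [hlen'] at hjl
        by_cases hjpos : j = pos
        · rw [hjpos, hgetp]; exact pvLe_of_lt hlt
        · rw [hget' j hjpos]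
          refine pvLe_trans (pvLe_of_lt hlt) ?_
          have he := hC1 j hj1 hjl (by rw [hjp]; exact hdesc') (by omega) hjpos
          unfold pvEdge at he; rw [hjp] at he; exact he
      have hC2b' : pvPar pos ≠ r → ∀ j, 1 ≤ j → j < h'.length → pvPar j = pvPar pos →
          pvLe (h'.getD (pvPar (pvPar pos)) pvE0) (h'.getD j pvE0) := by
        intro hner j hj1 hjl hjp
        rw [hlen'] at hjl
        have hgpne : pvPar (pvPar pos) ≠ pos := by
          have : pvPar (pvPar pos) ≤ pvPar pos := by unfold pvPar; omega
          omega
        rw [hget' _ hgpne]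
        have hgp : pvLe (h.getD (pvPar (pvPar pos)) pvE0) parent := by
          rcases Nat.eq_zero_or_pos (pvPar pos) with h0 | h0
          · rw [hpar, h0]
            have e : pvPar 0 = 0 := rfl
            rw [e]
            exact pvLe_refl _
          · have he := hC1 (pvPar pos) h0 (by omega) (pvDesc_par hdesc' hner)
              (by omega) (by omega)
            unfold pvEdge at he
            rw [← hpar] at he
            exact he
        by_cases hjpos : j = pos
        · rw [hjpos, hgetp]; exact hgp
        · rw [hget' j hjpos]
          refine pvLe_trans hgp ?_
          have he := hC1 j hj1 hjl (by rw [hjp]; exact hdesc') (by omega) hjpos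
          unfold pvEdge at he; rw [hjp] at he
          rw [← hpar] at he
          exact he
      obtain ⟨ihlen, ihms, ihloc, ihedge⟩ :=
        ih (pvPar pos) hpplt newitem h' r (by omega) hdesc' hC1' hC2a' hC2b'
      refine ⟨ihlen.trans hlen', ?_, ?_, ?_⟩
      · -- multiset bookkeeping
        have e1 : h'.getD (pvPar pos) pvE0 = parent := by
          rw [hget' _ (by omega), hpar]
        rw [e1] at ihms
        have e2 : (↑h' : Multiset pvE) + {h.getD pos pvE0} = (↑h : Multiset pvE) + {parent} :=
          pvMsetSet h pos parent pvE0 hlen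
        have e3 : (↑(pvSiftdownLoop newitem h' r (pvPar pos)) : Multiset pvE) +
            {h.getD pos pvE0} + {parent} = ((↑h : Multiset pvE) + {newitem}) + {parent} := by
          calc (↑(pvSiftdownLoop newitem h' r (pvPar pos)) : Multiset pvE) +
              {h.getD pos pvE0} + {parent}
              = ((↑(pvSiftdownLoop newitem h' r (pvPar pos)) : Multiset pvE) + {parent}) +
                {h.getD pos pvE0} := by abel
            _ = ((↑h' : Multiset pvE) + {newitem}) + {h.getD pos pvE0} := by rw [ihms]
            _ = ((↑h' : Multiset pvE) + {h.getD pos pvE0}) + {newitem} := by abel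
            _ = ((↑h : Multiset pvE) + {parent}) + {newitem} := by rw [e2]
            _ = ((↑h : Multiset pvE) + {newitem}) + {parent} := by abel
        exact add_right_cancel e3
      · intro j hj
        rw [ihloc j hj, hget' j (fun hc => hj (hc ▸ hdesc))]
      · intro j hj1 hjl hjd
        exact ihedge j hj1 (by omega) hjd
    · rw [if_neg hlt]
      have hlt' : pvLe parent newitem := by
        simp only [Bool.not_eq_true] at hlt; exact hlt
      refine ⟨List.length_set .., pvMsetSet h pos newitem pvE0 hlen, ?_, ?_⟩
      · intro j hj
        exact pvGetDSetNe h pos j newitem (fun hc => hj (hc ▸ hdesc))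
      · intro j hj1 hjl hjd
        unfold pvEdge
        by_cases hjpos : j = pos
        · have hppne : pvPar pos ≠ pos := by omega
          rw [hjpos, pvGetDSetEq _ _ _ hlen, pvGetDSetNe _ _ _ _ hppne]
          exact hlt'
        by_cases hpjpos : pvPar j = pos
        · rw [pvGetDSetNe _ _ _ _ hjpos, hpjpos, pvGetDSetEq _ _ _ hlen]
          exact hC2a j hj1 hjl hpjpos
        · rw [pvGetDSetNe _ _ _ _ hjpos, pvGetDSetNe _ _ _ _ hpjpos]
          exact hC1 j hj1 hjl hjd hpjpos hjpos
  · -- pos = r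
    have hposr : pos = r := by
      have := pvDesc_le hdesc; omega
    rw [pvSdLoop_eq, if_neg hrp]
    refine ⟨List.length_set .., pvMsetSet h pos newitem pvE0 hlen, ?_, ?_⟩
    · intro j hj
      exact pvGetDSetNe h pos j newitem (fun hc => hj (hc ▸ hdesc))
    · intro j hj1 hjl hjd
      unfold pvEdge
      by_cases hjpos : j = pos
      · exfalso
        rw [hjpos, hposr] at hjd
        exact pvNotDescParSelf (by omega) hjd
      by_cases hpjpos : pvPar j = pos
      · rw [pvGetDSetNe _ _ _ _ hjpos, hpjpos, pvGetDSetEq _ _ _ hlen]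
        exact hC2a j hj1 hjl hpjpos
      · rw [pvGetDSetNe _ _ _ _ hjpos, pvGetDSetNe _ _ _ _ hpjpos]
        exact hC1 j hj1 hjl hjd hpjpos hjpos
-- Layer 3: _siftup, heapify, heappush, heappop specifications; root minimality
theorem pvSuLoop_eq (h : List pvE) (endpos startpos pos childpos : Nat) (newitem : pvE) :
    pvSiftupLoop h endpos startpos pos childpos newitem =
      if childpos < endpos then
        pvSiftupLoop
          (h.set pos (h.getD (if childpos + 1 < endpos &&
              !(pvELt (h.getD childpos pvE0) (h.getD (childpos + 1) pvE0)) then childpos + 1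
            else childpos) pvE0))
          endpos startpos
          (if childpos + 1 < endpos &&
              !(pvELt (h.getD childpos pvE0) (h.getD (childpos + 1) pvE0)) then childpos + 1
            else childpos)
          (2 * (if childpos + 1 < endpos &&
              !(pvELt (h.getD childpos pvE0) (h.getD (childpos + 1) pvE0)) then childpos + 1
            else childpos) + 1) newitem
      else pvSiftdown (h.set pos newitem) startpos pos := by
  rw [pvSiftupLoop]
  rfl

theorem pvSuLoop_spec : ∀ (n : Nat) (h : List pvE) (r pos childpos : Nat) (newitem : pvE),
    h.length - childpos = n → pos < h.length → pvDesc r pos → childpos = 2 * pos + 1 →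
    (∀ j, 1 ≤ j → j < h.length → pvDesc r (pvPar j) → pvPar j ≠ pos → j ≠ pos →
      pvEdge h j) →
    (pos ≠ r → ∀ j, 1 ≤ j → j < h.length → pvPar j = pos →
      pvLe (h.getD (pvPar pos) pvE0) (h.getD j pvE0)) →
    (pvSiftupLoop h h.length r pos childpos newitem).length = h.length ∧
    (↑(pvSiftupLoop h h.length r pos childpos newitem) : Multiset pvE) + {h.getD pos pvE0} =
      (↑h : Multiset pvE) + {newitem} ∧
    (∀ j, ¬ pvDesc r j →
      (pvSiftupLoop h h.length r pos childpos newitem).getD j pvE0 = h.getD j pvE0) ∧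
    (∀ j, 1 ≤ j → j < h.length → pvDesc r (pvPar j) →
      pvEdge (pvSiftupLoop h h.length r pos childpos newitem) j) := by
  intro n
  induction n using Nat.strong_induction_on with
  | _ n ih =>
  intro h r pos childpos newitem hn hlen hdesc hcp hC1 hC2b
  by_cases hce : childpos < h.length
  · rw [pvSuLoop_eq, if_pos hce]
    set c := if childpos + 1 < h.length &&
        !(pvELt (h.getD childpos pvE0) (h.getD (childpos + 1) pvE0)) then childpos + 1
      else childpos with hc
    have hcsplit : (c = childpos + 1 ∧ childpos + 1 < h.length ∧
        pvELt (h.getD childpos pvE0) (h.getD (childpos + 1) pvE0) = false) ∨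
        (c = childpos ∧ (childpos + 1 < h.length →
          pvELt (h.getD childpos pvE0) (h.getD (childpos + 1) pvE0) = true)) := by
      rw [hc]
      by_cases hcond : (childpos + 1 < h.length &&
          !(pvELt (h.getD childpos pvE0) (h.getD (childpos + 1) pvE0))) = true
      · rw [if_pos hcond]
        rw [Bool.and_eq_true] at hcond
        obtain ⟨hc1, hc2⟩ := hcond
        rw [Bool.not_eq_true'] at hc2
        exact Or.inl ⟨rfl, of_decide_eq_true hc1, hc2⟩
      · rw [if_neg hcond]
        refine Or.inr ⟨rfl, fun hlt1 => ?_⟩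
        have hcond' : (decide (childpos + 1 < h.length) &&
            !(pvELt (h.getD childpos pvE0) (h.getD (childpos + 1) pvE0))) = false := by
          revert hcond
          cases (decide (childpos + 1 < h.length) &&
            !(pvELt (h.getD childpos pvE0) (h.getD (childpos + 1) pvE0))) <;> simp
        rcases Bool.and_eq_false_iff.mp hcond' with hf | hf
        · exact absurd (decide_eq_true hlt1) (by rw [hf]; exact Bool.false_ne_true)
        · rw [Bool.not_eq_false'] at hf
          exact hf
    have hcend : c < h.length := by
      rcases hcsplit with ⟨he, hb, _⟩ | ⟨he, _⟩ <;> omega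
    have hcchild : c = 2 * pos + 1 ∨ c = 2 * pos + 2 := by
      rcases hcsplit with ⟨he, _, _⟩ | ⟨he, _⟩ <;> omega
    have hparc : pvPar c = pos := by
      unfold pvPar; rcases hcchild with he | he <;> omega
    have hcgt : pos < c := by rcases hcchild with he | he <;> omega
    have hmin : ∀ s, 1 ≤ s → s < h.length → pvPar s = pos →
        pvLe (h.getD c pvE0) (h.getD s pvE0) := by
      intro s hs1 hsl hsp
      have hs12 : s = 2 * pos + 1 ∨ s = 2 * pos + 2 := by unfold pvPar at hsp; omega
      by_cases hsc : s = c
      · rw [hsc]; exact pvLe_refl _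
      rcases hcsplit with ⟨he, hb, hf⟩ | ⟨he, himp⟩
      · have hs : s = childpos := by omega
        rw [he, hs]
        exact hf
      · have hs : s = childpos + 1 := by omega
        have hsl' : childpos + 1 < h.length := by omega
        rw [he, hs]
        exact pvLe_of_lt (himp hsl')
    set h' := h.set pos (h.getD c pvE0) with hh'
    have hlen' : h'.length = h.length := List.length_set ..
    have hget' : ∀ j, j ≠ pos → h'.getD j pvE0 = h.getD j pvE0 := fun j hj =>
      pvGetDSetNe h pos j _ hj
    have hgetp : h'.getD pos pvE0 = h.getD c pvE0 := pvGetDSetEq h pos _ hlen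
    have hdescc : pvDesc r c := pvDesc_child (hparc ▸ hdesc)
    have hC1' : ∀ j, 1 ≤ j → j < h'.length → pvDesc r (pvPar j) → pvPar j ≠ c →
        j ≠ c → pvEdge h' j := by
      intro j hj1 hjl hjd hjp1 hjp2
      rw [hlen'] at hjl
      unfold pvEdge
      by_cases hjpos : j = pos
      · -- edge into pos; scope forces pos ≠ r
        subst hjpos
        have hposr : j ≠ r := by
          intro hc'
          subst hc'
          exact pvNotDescParSelf hj1 hjd
        have hppne : pvPar j ≠ j := by have := pvPar_lt hj1; omega
        rw [hget' _ hppne, hgetp]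
        exact hC2b hposr c (by omega) hcend hparc
      by_cases hpjpos : pvPar j = pos
      · rw [hget' j hjpos, hpjpos, hgetp]
        exact hmin j hj1 hjl hpjpos
      · rw [hget' j hjpos, hget' _ hpjpos]
        exact hC1 j hj1 hjl hjd hpjpos hjpos
    have hC2b' : c ≠ r → ∀ j, 1 ≤ j → j < h'.length → pvPar j = c →
        pvLe (h'.getD (pvPar c) pvE0) (h'.getD j pvE0) := by
      intro _ j hj1 hjl hjp
      rw [hlen'] at hjl
      have hjnc : j ≠ pos := by have := pvPar_child_ge hjp hj1; omega
      rw [hparc, hgetp, hget' j hjnc]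
      have he := hC1 j hj1 hjl (by rw [hjp]; exact hdescc) (by omega) hjnc
      unfold pvEdge at he; rw [hjp] at he
      exact he
    obtain ⟨ihlen, ihms, ihloc, ihedge⟩ :=
      ih (h.length - (2 * c + 1)) (by omega) h' r c (2 * c + 1) newitem
        (by omega) (by omega) hdescc rfl
        hC1' hC2b'
    rw [hlen'] at ihlen ihms ihloc ihedge
    refine ⟨ihlen, ?_, ?_, ?_⟩
    · have e1 : h'.getD c pvE0 = h.getD c pvE0 := hget' c (by omega)
      rw [e1] at ihms
      have e2 : (↑h' : Multiset pvE) + {h.getD pos pvE0} =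
          (↑h : Multiset pvE) + {h.getD c pvE0} := pvMsetSet h pos _ pvE0 hlen
      have e3 : (↑(pvSiftupLoop h' h.length r c (2 * c + 1) newitem) : Multiset pvE) +
          {h.getD pos pvE0} + {h.getD c pvE0} =
          ((↑h : Multiset pvE) + {newitem}) + {h.getD c pvE0} := by
        calc (↑(pvSiftupLoop h' h.length r c (2 * c + 1) newitem) : Multiset pvE) +
            {h.getD pos pvE0} + {h.getD c pvE0}
            = ((↑(pvSiftupLoop h' h.length r c (2 * c + 1) newitem) : Multiset pvE) +
              {h.getD c pvE0}) + {h.getD pos pvE0} := by abel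
          _ = ((↑h' : Multiset pvE) + {newitem}) + {h.getD pos pvE0} := by rw [ihms]
          _ = ((↑h' : Multiset pvE) + {h.getD pos pvE0}) + {newitem} := by abel
          _ = ((↑h : Multiset pvE) + {h.getD c pvE0}) + {newitem} := by rw [e2]
          _ = ((↑h : Multiset pvE) + {newitem}) + {h.getD c pvE0} := by abel
      exact add_right_cancel e3
    · intro j hj
      rw [ihloc j hj, hget' j (fun hc' => hj (hc' ▸ hdesc))]
    · exact ihedge
  · -- leaf: place newitem and sift down
    rw [pvSuLoop_eq, if_neg hce]
    have hnochild : ∀ j, 1 ≤ j → j < h.length → pvPar j ≠ pos := by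
      intro j hj1 hjl hjp
      have := pvPar_child_ge hjp hj1
      omega
    set h'' := h.set pos newitem with hh''
    have hlen'' : h''.length = h.length := List.length_set ..
    have hget'' : ∀ j, j ≠ pos → h''.getD j pvE0 = h.getD j pvE0 := fun j hj =>
      pvGetDSetNe h pos j _ hj
    have hgetp'' : h''.getD pos pvE0 = newitem := pvGetDSetEq h pos _ hlen
    have hsd : pvSiftdown h'' r pos = pvSiftdownLoop newitem h'' r pos := by
      unfold pvSiftdown; rw [hgetp'']
    obtain ⟨sdlen, sdms, sdloc, sdedge⟩ :=
      pvSdLoop_spec pos newitem h'' r (by omega) hdesc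
        (by
          intro j hj1 hjl hjd hjp1 hjp2
          rw [hlen''] at hjl
          unfold pvEdge
          rw [hget'' j hjp2, hget'' _ hjp1]
          exact hC1 j hj1 hjl hjd hjp1 hjp2)
        (by
          intro j hj1 hjl hjp
          rw [hlen''] at hjl
          exact absurd hjp (hnochild j hj1 hjl))
        (by
          intro _ j hj1 hjl hjp
          rw [hlen''] at hjl
          exact absurd hjp (hnochild j hj1 hjl))
    rw [hgetp''] at sdms
    have hres : (↑(pvSiftdownLoop newitem h'' r pos) : Multiset pvE) = ↑h'' :=
      add_right_cancel sdms
    rw [hsd]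
    rw [hlen''] at sdlen sdedge
    refine ⟨sdlen, ?_, ?_, sdedge⟩
    · rw [hres]
      exact pvMsetSet h pos newitem pvE0 hlen
    · intro j hj
      rw [sdloc j hj, hget'' j (fun hc' => hj (hc' ▸ hdesc))]
-- Layer 3b: siftup wrapper, heapify, heappush, heappop, root minimality
def pvHeapAt (h : List pvE) (i : Nat) : Prop :=
  ∀ j, 1 ≤ j → j < h.length → pvDesc i (pvPar j) → pvEdge h j

theorem pvSiftup_spec (h : List pvE) (pos : Nat) (hlen : pos < h.length)
    (hC1 : ∀ j, 1 ≤ j → j < h.length → pvDesc pos (pvPar j) → pvPar j ≠ pos → j ≠ pos →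
      pvEdge h j) :
    (pvSiftup h pos).length = h.length ∧
    (↑(pvSiftup h pos) : Multiset pvE) = (↑h : Multiset pvE) ∧
    (∀ j, ¬ pvDesc pos j → (pvSiftup h pos).getD j pvE0 = h.getD j pvE0) ∧
    pvHeapAt (pvSiftup h pos) pos := by
  obtain ⟨hl, hm, hloc, hedge⟩ :=
    pvSuLoop_spec (h.length - (2 * pos + 1)) h pos pos (2 * pos + 1) (h.getD pos pvE0)
      rfl hlen (pvDesc_refl pos) rfl hC1 (fun hc => absurd rfl hc)
  refine ⟨hl, add_right_cancel hm, hloc, ?_⟩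
  intro j hj1 hjl hjd
  have hjl' : j < h.length := by
    have : (pvSiftup h pos).length = h.length := hl
    omega
  exact hedge j hj1 hjl' hjd

theorem pvHeapifyAux : ∀ (K : Nat) (h : List pvE),
    K ≤ h.length / 2 →
    (∀ i', K ≤ i' → pvHeapAt h i') →
    (((List.range K).reverse.foldl (fun acc i => pvSiftup acc i) h).length = h.length ∧
    (↑((List.range K).reverse.foldl (fun acc i => pvSiftup acc i) h) : Multiset pvE) =
      (↑h : Multiset pvE) ∧
    ∀ i', pvHeapAt ((List.range K).reverse.foldl (fun acc i => pvSiftup acc i) h) i') := by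
  intro K
  induction K with
  | zero =>
    intro h _ hpre
    exact ⟨rfl, rfl, fun i' => hpre i' (Nat.zero_le _)⟩
  | succ K ih =>
    intro h hK hpre
    rw [List.range_succ, List.reverse_append, List.reverse_singleton, List.singleton_append,
      List.foldl_cons]
    have hKlen : K < h.length := by omega
    obtain ⟨sl, sm, sloc, sheap⟩ := pvSiftup_spec h K hKlen (by
      intro j hj1 hjl hjd hjp1 hjp2
      rcases pvDesc_split hjd hjp1 with hd | hd
      · exact hpre (2 * K + 1) (by omega) j hj1 hjl hd
      · exact hpre (2 * K + 2) (by omega) j hj1 hjl hd)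
    have hpre' : ∀ i', K ≤ i' → pvHeapAt (pvSiftup h K) i' := by
      intro i' hi'
      rcases Nat.eq_or_lt_of_le hi' with he | hlt
      · exact he ▸ sheap
      · intro j hj1 hjl hjd
        rw [sl] at hjl
        by_cases hKi' : pvDesc K i'
        · exact sheap j hj1 (by rw [sl]; exact hjl) (pvDesc_trans hKi' hjd)
        · have hjd' : pvDesc i' j := pvDesc_child hjd
          have hnotp : ¬ pvDesc K (pvPar j) := by
            intro hc
            rcases pvDesc_comparable hc hjd with hx | hx
            · exact hKi' hx
            · have := pvDesc_le hx; omega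
          have hnotj : ¬ pvDesc K j := by
            intro hc
            rcases pvDesc_comparable hc hjd' with hx | hx
            · exact hKi' hx
            · have := pvDesc_le hx; omega
          unfold pvEdge
          rw [sloc j hnotj, sloc (pvPar j) hnotp]
          exact hpre i' (by omega) j hj1 hjl hjd
    obtain ⟨rl, rm, rheap⟩ := ih (pvSiftup h K) (by rw [sl]; omega) hpre'
    exact ⟨by rw [rl, sl], by rw [rm, sm], rheap⟩
-- Layer 3c: heapify, heappush, heappop specs; root minimality
theorem pvHeapify_spec (h : List pvE) :
    (pvHeapify h).length = h.length ∧
    (↑(pvHeapify h) : Multiset pvE) = (↑h : Multiset pvE) ∧ pvIsHeap (pvHeapify h) := by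
  obtain ⟨hl, hm, hheap⟩ := pvHeapifyAux (h.length / 2) h (le_refl _) (by
    intro i' hi' j hj1 hjl hjd
    exfalso
    have h1 := pvDesc_le hjd
    have h2 := pvPar_child_ge (rfl : pvPar j = pvPar j) hj1
    omega)
  exact ⟨hl, hm, fun j hj1 hjl => hheap 0 j hj1 hjl (pvDesc_zero _)⟩

theorem pvGetDAppL (h : List pvE) (x : pvE) (j : Nat) (hj : j < h.length) :
    (h ++ [x]).getD j pvE0 = h.getD j pvE0 := by
  rw [List.getD_eq_getElem?_getD, List.getD_eq_getElem?_getD, List.getElem?_append_left hj]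

theorem pvGetDAppR (h : List pvE) (x : pvE) :
    (h ++ [x]).getD h.length pvE0 = x := by
  rw [List.getD_eq_getElem?_getD, List.getElem?_concat_length]; rfl

theorem pvHeappush_spec (h : List pvE) (x : pvE) (hh : pvIsHeap h) :
    (pvHeappush h x).length = h.length + 1 ∧
    (↑(pvHeappush h x) : Multiset pvE) = (↑h : Multiset pvE) + {x} ∧
    pvIsHeap (pvHeappush h x) := by
  have hlen : h.length < (h ++ [x]).length := by simp
  have hpush : pvHeappush h x = pvSiftdownLoop x (h ++ [x]) 0 h.length := by
    unfold pvHeappush pvSiftdown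
    rw [pvGetDAppR]
  obtain ⟨sl, sm, -, sedge⟩ := pvSdLoop_spec h.length x (h ++ [x]) 0 hlen (pvDesc_zero _)
    (by
      intro j hj1 hjl hjd hjp1 hjp2
      have hjlt : j < h.length := by simp at hjl; omega
      have hplt : pvPar j < h.length := by have := pvPar_lt hj1; omega
      unfold pvEdge
      rw [pvGetDAppL _ _ _ hjlt, pvGetDAppL _ _ _ hplt]
      exact hh j hj1 hjlt)
    (by
      intro j hj1 hjl hjp
      have := pvPar_child_ge hjp hj1
      simp at hjl; omega)
    (by
      intro _ j hj1 hjl hjp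
      have := pvPar_child_ge hjp hj1
      simp at hjl; omega)
  rw [pvGetDAppR] at sm
  have hres : (↑(pvSiftdownLoop x (h ++ [x]) 0 h.length) : Multiset pvE) =
      (↑(h ++ [x]) : Multiset pvE) := add_right_cancel sm
  rw [hpush]
  refine ⟨by rw [sl]; simp, by rw [hres, ← Multiset.coe_singleton, Multiset.coe_add], ?_⟩
  intro j hj1 hjl
  rw [sl] at hjl
  exact sedge j hj1 hjl (pvDesc_zero _)

theorem pvGetDDropLast (h : List pvE) (j : Nat) (hj : j < h.length - 1) :
    h.dropLast.getD j pvE0 = h.getD j pvE0 := by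
  rw [List.getD_eq_getElem?_getD, List.getD_eq_getElem?_getD, List.getElem?_dropLast]
  rw [if_pos hj]

theorem pvHeappop_spec (h : List pvE) (hne : h ≠ []) (hh : pvIsHeap h) :
    (pvHeappop h).1 = h.getD 0 pvE0 ∧
    ((pvHeappop h).1 ::ₘ (↑(pvHeappop h).2 : Multiset pvE)) = (↑h : Multiset pvE) ∧
    pvIsHeap (pvHeappop h).2 ∧ (pvHeappop h).2.length + 1 = h.length := by
  have hlen1 : 0 < h.length := List.length_pos_iff.mpr hne
  have hld : h.dropLast.length = h.length - 1 := List.length_dropLast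
  have hsplit : h.dropLast ++ [h.getLastD pvE0] = h := by
    rw [List.getLastD_eq_getLast?, List.getLast?_eq_getLast hne]
    exact List.dropLast_append_getLast hne
  simp only [pvHeappop]
  by_cases hemp : h.dropLast.isEmpty
  · rw [if_pos hemp]
    have hrest : h.dropLast = [] := List.isEmpty_iff.mp hemp
    have hl1 : h.length = 1 := by
      rw [hrest] at hld
      simp at hld
      omega
    obtain ⟨a, ha⟩ := List.length_eq_one_iff.mp hl1
    subst ha
    refine ⟨rfl, by simp, fun j hj1 hjl => by simp at hjl, by simp⟩
  · rw [if_neg hemp]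
    have hrest : h.dropLast ≠ [] := fun hc => hemp (by rw [hc]; rfl)
    have hlen2 : 2 ≤ h.length := by
      rcases Nat.lt_or_ge h.length 2 with hl | hl
      · exfalso
        apply hrest
        have h0 : h.dropLast.length = 0 := by omega
        exact List.length_eq_zero_iff.mp h0
      · exact hl
    have hl0 : (h.dropLast.set 0 (h.getLastD pvE0)).length = h.length - 1 := by
      rw [List.length_set, hld]
    obtain ⟨sl, sm, -, sheap⟩ :=
      pvSiftup_spec (h.dropLast.set 0 (h.getLastD pvE0)) 0 (by omega) (by
        intro j hj1 hjl hjd hjp1 hjp2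
        rw [hl0] at hjl
        have hjlt : j < h.length - 1 := by omega
        have hplt : pvPar j < h.length - 1 := by have := pvPar_lt hj1; omega
        unfold pvEdge
        rw [pvGetDSetNe _ _ _ _ hjp2, pvGetDSetNe _ _ _ _ hjp1,
          pvGetDDropLast _ _ hjlt, pvGetDDropLast _ _ hplt]
        exact hh j hj1 (by omega))
    have hget0 : h.dropLast.getD 0 pvE0 = h.getD 0 pvE0 := pvGetDDropLast _ _ (by omega)
    have e1 : (↑(h.dropLast.set 0 (h.getLastD pvE0)) : Multiset pvE) +
        {h.dropLast.getD 0 pvE0} =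
        (↑h.dropLast : Multiset pvE) + {h.getLastD pvE0} :=
      pvMsetSet h.dropLast 0 _ pvE0 (by omega)
    have e2 : (↑h : Multiset pvE) = (↑h.dropLast : Multiset pvE) + {h.getLastD pvE0} := by
      conv_lhs => rw [← hsplit]
      rw [← Multiset.coe_singleton, Multiset.coe_add]
    refine ⟨hget0, ?_, ?_, ?_⟩
    · rw [← Multiset.singleton_add, sm, e2, ← e1]
      abel
    · intro j hj1 hjl
      exact sheap j hj1 hjl (pvDesc_zero _)
    · rw [sl, hl0]; omega

theorem pvRootMin (h : List pvE) (hh : pvIsHeap h) :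
    ∀ j, j < h.length → pvLe (h.getD 0 pvE0) (h.getD j pvE0) := by
  intro j
  induction j using Nat.strong_induction_on with
  | _ j ih =>
  intro hjl
  rcases Nat.eq_zero_or_pos j with h0 | h0
  · subst h0; exact pvLe_refl _
  · have hp := pvPar_lt h0
    exact pvLe_trans (ih (pvPar j) hp (by omega)) (hh j h0 hjl)

theorem pvRootMinMem (h : List pvE) (hh : pvIsHeap h) :
    ∀ x ∈ h, pvLe (h.getD 0 pvE0) x := by
  intro x hx
  obtain ⟨j, hj, rfl⟩ := List.mem_iff_getElem.mp hx
  rw [← List.getD_eq_getElem h pvE0 hj]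
  exact pvRootMin h hh j hj
-- Layer 4: exact ceiling-division arithmetic
def pvCeil (g k : Int) : Int := -(PySem.Int.floordiv (-g) k)

theorem pvCeil_bounds {g k : Int} (hk : 0 < k) :
    (pvCeil g k - 1) * k < g ∧ g ≤ pvCeil g k * k :=
  (PySem.Int.neg_floordiv_neg_eq_iff_of_pos hk).mp rfl

theorem pvCeil_le_iff {g k v : Int} (hk : 0 < k) : pvCeil g k ≤ v ↔ g ≤ v * k := by
  obtain ⟨h1, h2⟩ := pvCeil_bounds (g := g) hk
  constructor
  · intro h
    calc g ≤ pvCeil g k * k := h2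
      _ ≤ v * k := by nlinarith
  · intro h
    by_contra hc
    rw [not_le] at hc
    have : v * k ≤ (pvCeil g k - 1) * k := by nlinarith
    omega

theorem pvCeil_lt_iff {g k v : Int} (hk : 0 < k) : v < pvCeil g k ↔ v * k < g := by
  rw [← not_le, ← not_le, pvCeil_le_iff hk]

theorem pvCeil_one (g : Int) : pvCeil g 1 = g := by
  obtain ⟨h1, h2⟩ := pvCeil_bounds (g := g) (k := 1) (by omega)
  omega

theorem pvCeil_pos_iff {g k : Int} (hk : 0 < k) : 1 ≤ pvCeil g k ↔ 1 ≤ g := by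
  constructor
  · intro h
    by_contra hc
    rw [not_le] at hc
    have : pvCeil g k ≤ 0 := (pvCeil_le_iff hk).mpr (by nlinarith)
    omega
  · intro h
    by_contra hc
    rw [not_le] at hc
    have : g ≤ 0 * k := (pvCeil_le_iff hk).mp (by omega)
    omega

theorem pvCeil_anti {g j k : Int} (hg : 1 ≤ g) (hj : 0 < j) (hjk : j ≤ k) :
    pvCeil g k ≤ pvCeil g j := by
  have hk : (0:Int) < k := by omega
  have hq : 1 ≤ pvCeil g j := (pvCeil_pos_iff hj).mpr hg
  rw [pvCeil_le_iff hk]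
  have := (pvCeil_bounds (g := g) hj).2
  nlinarith

theorem pvFdivCeil {g v : Int} (hv : 0 < v) :
    PySem.Int.floordiv (g - 1) v = pvCeil g v - 1 := by
  obtain ⟨h1, h2⟩ :=
    (PySem.Int.floordiv_eq_iff_of_pos hv (a := g - 1) (q := PySem.Int.floordiv (g - 1) v)).mp rfl
  have : pvCeil g v = PySem.Int.floordiv (g - 1) v + 1 := by
    rw [show pvCeil g v = -(PySem.Int.floordiv (-g) v) from rfl]
    rw [PySem.Int.neg_floordiv_neg_eq_iff_of_pos hv]
    constructor <;> nlinarith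
  omega

-- Layer 5: the greedy invariant carried through A's main loop
def pvGap (e : pvE) : Int := -e.2.1
def pvDiv (e : pvE) : Int := e.2.2
def pvVal (e : pvE) : Int := -e.1

def pvWF (e : pvE) : Prop :=
  1 ≤ pvDiv e ∧ pvVal e = pvCeil (pvGap e) (pvDiv e) ∧ (pvGap e ≤ 0 → pvDiv e = 1)

def pvMaxV (h : List pvE) : Int := pvVal (h.getD 0 pvE0)

def pvInv (h : List pvE) : Prop :=
  pvIsHeap h ∧ h ≠ [] ∧ (∀ e ∈ h, pvWF e) ∧ (∃ e ∈ h, 1 ≤ pvGap e) ∧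
  (∀ e ∈ h, 2 ≤ pvDiv e → pvMaxV h ≤ pvCeil (pvGap e) (pvDiv e - 1))

def pvGapsM (h : List pvE) : Multiset Int := (↑h : Multiset pvE).map pvGap
def pvSumK (h : List pvE) : Int := ((↑h : Multiset pvE).map (fun e => pvDiv e - 1)).sum

theorem pvLe_val {a b : pvE} (h : pvLe a b) : pvVal b ≤ pvVal a := by
  have := pvLe_fst h
  unfold pvVal
  omega

theorem pvRootMem (h : List pvE) (hne : h ≠ []) : h.getD 0 pvE0 ∈ h := by
  cases h with
  | nil => exact absurd rfl hne
  | cons a t => simp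

theorem pvMaxV_max (h : List pvE) (hh : pvIsHeap h) (x : pvE) (hx : x ∈ h) :
    pvVal x ≤ pvMaxV h := pvLe_val (pvRootMinMem h hh x hx)

theorem pvValPos (e : pvE) (hwf : pvWF e) (hg : 1 ≤ pvGap e) : 1 ≤ pvVal e := by
  obtain ⟨h1, h2, _⟩ := hwf
  rw [h2]
  exact (pvCeil_pos_iff (by omega)).mpr hg

def pvBump (t : pvE) : pvE := (-(pvCeil (pvGap t) (pvDiv t + 1)), t.2.1, t.2.2 + 1)

theorem pvBump_gap (t : pvE) : pvGap (pvBump t) = pvGap t := rfl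
theorem pvBump_div (t : pvE) : pvDiv (pvBump t) = pvDiv t + 1 := rfl
theorem pvBump_val (t : pvE) : pvVal (pvBump t) = pvCeil (pvGap t) (pvDiv t + 1) := by
  unfold pvVal pvBump
  simp

theorem pvEnt_eq (t : pvE) :
    ((-1 * -(PySem.Int.floordiv (-(-1 * t.2.1)) (t.2.2 + 1)), t.2.1, t.2.2 + 1) : pvE) =
      pvBump t := by
  unfold pvBump pvCeil pvGap pvDiv
  ring_nf

theorem pvStep_spec (h : List pvE) (hinv : pvInv h) :
    pvInv (pvHeappush (pvHeappop h).2 (pvBump (pvHeappop h).1)) ∧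
    pvGapsM (pvHeappush (pvHeappop h).2 (pvBump (pvHeappop h).1)) = pvGapsM h ∧
    pvSumK (pvHeappush (pvHeappop h).2 (pvBump (pvHeappop h).1)) = pvSumK h + 1 ∧
    pvMaxV (pvHeappush (pvHeappop h).2 (pvBump (pvHeappop h).1)) ≤ pvMaxV h := by
  obtain ⟨hheap, hne, hwf, hpos, hinv5⟩ := hinv
  have hspec := pvHeappop_spec h hne hheap
  generalize hpop : pvHeappop h = p
  rw [hpop] at hspec
  obtain ⟨ptop, pms, pheap, plen⟩ := hspec
  have htopmem : p.1 ∈ h := by rw [ptop]; exact pvRootMem h hne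
  obtain ⟨hd1, hv1, hg1⟩ := hwf p.1 htopmem
  have hVtop : pvVal p.1 = pvMaxV h := by rw [ptop]; rfl
  have hVpos : 1 ≤ pvMaxV h := by
    obtain ⟨e, he, hge⟩ := hpos
    exact le_trans (pvValPos e (hwf e he) hge) (pvMaxV_max h hheap e he)
  have hgtop : 1 ≤ pvGap p.1 := by
    by_contra hc
    rw [not_le] at hc
    have hdd : pvDiv p.1 = 1 := hg1 (by omega)
    rw [hdd, pvCeil_one] at hv1
    omega
  have hwfe' : pvWF (pvBump p.1) := by
    refine ⟨by rw [pvBump_div]; omega, by rw [pvBump_val, pvBump_gap, pvBump_div], ?_⟩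
    intro hc
    rw [pvBump_gap] at hc
    omega
  have hnewval : pvVal (pvBump p.1) ≤ pvMaxV h := by
    rw [pvBump_val, ← hVtop, hv1]
    exact pvCeil_anti hgtop (by omega) (by omega)
  obtain ⟨pushlen, pushms, pushheap⟩ := pvHeappush_spec p.2 (pvBump p.1) pheap
  have hresne : pvHeappush p.2 (pvBump p.1) ≠ [] := by
    intro hc
    rw [hc] at pushlen
    simp at pushlen
  have hmemres : ∀ x, x ∈ pvHeappush p.2 (pvBump p.1) ↔ x ∈ p.2 ∨ x = pvBump p.1 := by
    intro x
    rw [← Multiset.mem_coe, pushms]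
    simp [Multiset.mem_coe]
  have hrestmem : ∀ x, x ∈ p.2 → x ∈ h := by
    intro x hx
    rw [← Multiset.mem_coe, ← pms]
    simp [Multiset.mem_coe, hx]
  have hvalres : ∀ x, x ∈ pvHeappush p.2 (pvBump p.1) → pvVal x ≤ pvMaxV h := by
    intro x hx
    rcases (hmemres x).mp hx with hx' | hx'
    · exact pvMaxV_max h hheap x (hrestmem x hx')
    · rw [hx']; exact hnewval
  have hmaxres : pvMaxV (pvHeappush p.2 (pvBump p.1)) ≤ pvMaxV h :=
    hvalres _ (pvRootMem _ hresne)
  refine ⟨⟨pushheap, hresne, ?_, ?_, ?_⟩, ?_, ?_, hmaxres⟩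
  · intro e he
    rcases (hmemres e).mp he with he'' | he''
    · exact hwf e (hrestmem e he'')
    · rw [he'']; exact hwfe'
  · exact ⟨pvBump p.1, (hmemres _).mpr (Or.inr rfl), by rw [pvBump_gap]; exact hgtop⟩
  · intro e he hd2
    rcases (hmemres e).mp he with he'' | he''
    · exact le_trans hmaxres (hinv5 e (hrestmem e he'') hd2)
    · rw [he'', pvBump_gap, pvBump_div]
      have hsim : pvDiv p.1 + 1 - 1 = pvDiv p.1 := by omega
      rw [hsim, ← hv1, hVtop]
      exact hmaxres
  · unfold pvGapsM
    rw [pushms, ← pms]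
    simp [pvBump_gap]
    rw [← Multiset.cons_coe, ← Multiset.singleton_add, add_comm]
  · unfold pvSumK
    rw [pushms, ← pms]
    simp [pvBump_div]
    ring
-- Layer 6: loop invariant, the two inequalities, binary-search spec
theorem pvLoopA_succ (f : Nat) (hq : List pvE) :
    pvLoopA (f + 1) hq =
      pvLoopA f (pvHeappush (pvHeappop hq).2 (pvBump (pvHeappop hq).1)) := by
  rw [show pvLoopA (f + 1) hq = pvLoopA f (pvHeappush (pvHeappop hq).2
    ((-1 * -(PySem.Int.floordiv (-(-1 * (pvHeappop hq).1.2.1)) ((pvHeappop hq).1.2.2 + 1)),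
      (pvHeappop hq).1.2.1, (pvHeappop hq).1.2.2 + 1) : pvE)) from rfl, pvEnt_eq]

theorem pvLoopA_spec : ∀ (t : Nat) (h : List pvE), pvInv h →
    pvInv (pvLoopA t h) ∧ pvGapsM (pvLoopA t h) = pvGapsM h ∧
    pvSumK (pvLoopA t h) = pvSumK h + (t : Int) ∧ pvMaxV (pvLoopA t h) ≤ pvMaxV h := by
  intro t
  induction t with
  | zero => intro h hinv; exact ⟨hinv, rfl, by rw [show pvLoopA 0 h = h from rfl]; simp, le_refl _⟩
  | succ f ih =>
    intro h hinv
    obtain ⟨sinv, sgaps, ssum, smax⟩ := pvStep_spec h hinv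
    obtain ⟨linv, lgaps, lsum, lmax⟩ :=
      ih (pvHeappush (pvHeappop h).2 (pvBump (pvHeappop h).1)) sinv
    rw [pvLoopA_succ]
    refine ⟨linv, by rw [lgaps, sgaps], ?_, le_trans lmax smax⟩
    rw [lsum, ssum]
    push_cast
    ring

theorem pvMaxV_pos (h : List pvE) (hinv : pvInv h) : 1 ≤ pvMaxV h := by
  obtain ⟨hheap, hne, hwf, ⟨e, he, hge⟩, _⟩ := hinv
  exact le_trans (pvValPos e (hwf e he) hge) (pvMaxV_max h hheap e he)

theorem pvFilterMapSum (v : Int) (hv : 1 ≤ v) : ∀ l : List Int,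
    ((l.filter (fun g => decide (1 ≤ g))).map (fun g => PySem.Int.floordiv (g - 1) v)).sum =
      (l.map (fun g => if 1 ≤ g then pvCeil g v - 1 else 0)).sum := by
  intro l
  induction l with
  | nil => rfl
  | cons a t ih =>
    rw [List.filter_cons, List.map_cons, List.sum_cons]
    by_cases h1 : (1:Int) ≤ a
    · rw [if_pos (by exact decide_eq_true h1), List.map_cons, List.sum_cons, ih,
        pvFdivCeil (by omega), if_pos h1]
    · rw [if_neg (by simpa using h1), ih, if_neg h1]
      omega

theorem pvNeeded_sum (l : List Int) (v : Int) (hv : 1 ≤ v) :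
    pvNeeded l v = (l.map (fun g => if 1 ≤ g then pvCeil g v - 1 else 0)).sum := by
  unfold pvNeeded
  rw [PySem.List.foldl_add, zero_add, pvFilterMapSum v hv]

theorem pvSumMapLe (f g : pvE → Int) (s : Multiset pvE) (h : ∀ x ∈ s, f x ≤ g x) :
    (s.map f).sum ≤ (s.map g).sum := by
  induction s using Multiset.induction_on with
  | empty => simp
  | cons a t ih =>
    rw [Multiset.map_cons, Multiset.map_cons, Multiset.sum_cons, Multiset.sum_cons]
    have h1 := h a (Multiset.mem_cons_self a t)
    have h2 := ih (fun x hx => h x (Multiset.mem_cons_of_mem hx))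
    omega

-- pointwise bound: every entry's split count is at most what value v requires of its gap
theorem pvEntryBound (e : pvE) (hwf : pvWF e) (v : Int) (hv : 1 ≤ v)
    (hval : pvVal e ≤ v) :
    (fun g => if 1 ≤ g then pvCeil g v - 1 else 0) (pvGap e) ≤ pvDiv e - 1 := by
  obtain ⟨hd1, hveq, hg0⟩ := hwf
  by_cases hg : 1 ≤ pvGap e
  · simp only [if_pos hg]
    have h1 : pvGap e ≤ v * pvDiv e := (pvCeil_le_iff (by omega)).mp (by rw [← hveq]; exact hval)
    have h2 : pvCeil (pvGap e) v ≤ pvDiv e := (pvCeil_le_iff (by omega)).mpr (by nlinarith)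
    omega
  · simp only [if_neg hg]
    have := hg0 (by omega)
    omega

theorem pvIneq1 (H : List pvE) (hinv : pvInv H) (gaps : List Int)
    (hg : pvGapsM H = (↑gaps : Multiset Int)) :
    pvNeeded gaps (pvMaxV H) ≤ pvSumK H := by
  have hv := pvMaxV_pos H hinv
  rw [pvNeeded_sum _ _ hv]
  have e1 : (gaps.map (fun g => if 1 ≤ g then pvCeil g (pvMaxV H) - 1 else 0)).sum =
      ((↑gaps : Multiset Int).map (fun g => if 1 ≤ g then pvCeil g (pvMaxV H) - 1 else 0)).sum := by
    rw [Multiset.map_coe, Multiset.sum_coe]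
  rw [e1, ← hg]
  unfold pvGapsM pvSumK
  rw [Multiset.map_map]
  obtain ⟨hheap, hne, hwf, hpos, hinv5⟩ := hinv
  apply pvSumMapLe
  intro x hx
  have hxh : x ∈ H := Multiset.mem_coe.mp hx
  exact pvEntryBound x (hwf x hxh) (pvMaxV H) hv (pvMaxV_max H hheap x hxh)

theorem pvIneq2 (H : List pvE) (hinv : pvInv H) (gaps : List Int)
    (hg : pvGapsM H = (↑gaps : Multiset Int)) (v : Int) (hv : 1 ≤ v)
    (hneed : pvNeeded gaps v ≤ pvSumK H) : pvMaxV H ≤ v := by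
  by_contra hc
  rw [not_le] at hc
  obtain ⟨hheap, hne, hwf, hpos, hinv5⟩ := hinv
  have hrootmem : H.getD 0 pvE0 ∈ H := pvRootMem H hne
  obtain ⟨S, hS⟩ := Multiset.exists_cons_of_mem (Multiset.mem_coe.mpr hrootmem)
  have hmemS : ∀ x, x ∈ S → x ∈ H := by
    intro x hx
    rw [← Multiset.mem_coe, hS]
    exact Multiset.mem_cons_of_mem hx
  -- strict bound at the root entry
  obtain ⟨hd1, hveq, hg0⟩ := hwf _ hrootmem
  have hvroot : pvVal (H.getD 0 pvE0) = pvMaxV H := rfl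
  have hgroot : 1 ≤ pvGap (H.getD 0 pvE0) := by
    rw [← pvCeil_pos_iff (k := pvDiv (H.getD 0 pvE0)) (by omega), ← hveq, hvroot]
    omega
  have hstrict : pvDiv (H.getD 0 pvE0) - 1 <
      (fun g => if 1 ≤ g then pvCeil g v - 1 else 0) (pvGap (H.getD 0 pvE0)) := by
    simp only [if_pos hgroot]
    have h1 : ¬ pvCeil (pvGap (H.getD 0 pvE0)) (pvDiv (H.getD 0 pvE0)) ≤ v := by
      rw [← hveq, hvroot]; omega
    rw [pvCeil_le_iff (by omega), not_le] at h1
    have h2 : pvDiv (H.getD 0 pvE0) < pvCeil (pvGap (H.getD 0 pvE0)) v := by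
      rw [pvCeil_lt_iff (by omega)]
      nlinarith
    omega
  -- pointwise bound on the rest
  have hrest : ((S.map (fun e =>
      (fun g => if 1 ≤ g then pvCeil g v - 1 else 0) (pvGap e)))).sum ≥
      (S.map (fun e => pvDiv e - 1)).sum := by
    apply pvSumMapLe
    intro x hx
    have hxh := hmemS x hx
    have hxwf := hwf x hxh
    by_cases hd2 : 2 ≤ pvDiv x
    · have hgx : 1 ≤ pvGap x := by
        by_contra hgc
        rw [not_le] at hgc
        have := hxwf.2.2 (by omega)
        omega
      simp only [if_pos hgx]
      have h5 := hinv5 x hxh hd2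
      have h6 : v < pvCeil (pvGap x) (pvDiv x - 1) := by omega
      rw [pvCeil_lt_iff (by omega)] at h6
      have h7 : pvDiv x - 1 < pvCeil (pvGap x) v := by
        rw [pvCeil_lt_iff (by omega)]
        nlinarith
      omega
    · have := hxwf.1
      have hgx0 : pvDiv x - 1 = 0 := by omega
      rw [hgx0]
      by_cases hgx : 1 ≤ pvGap x
      · simp only [if_pos hgx]
        have : 1 ≤ pvCeil (pvGap x) v := (pvCeil_pos_iff (by omega)).mpr hgx
        omega
      · simp only [if_neg hgx]
        omega
    -- (end pointwise)
  have hneed' : pvNeeded gaps v =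
      (fun g => if 1 ≤ g then pvCeil g v - 1 else 0) (pvGap (H.getD 0 pvE0)) +
      (S.map (fun e => (fun g => if 1 ≤ g then pvCeil g v - 1 else 0) (pvGap e))).sum := by
    rw [pvNeeded_sum _ _ hv]
    have e1 : (gaps.map (fun g => if 1 ≤ g then pvCeil g v - 1 else 0)).sum =
        ((↑gaps : Multiset Int).map (fun g => if 1 ≤ g then pvCeil g v - 1 else 0)).sum := by
      rw [Multiset.map_coe, Multiset.sum_coe]
    rw [e1, ← hg]
    unfold pvGapsM
    rw [Multiset.map_map, hS, Multiset.map_cons, Multiset.sum_cons]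
    rfl
  have hsum' : pvSumK H = (pvDiv (H.getD 0 pvE0) - 1) +
      (S.map (fun e => pvDiv e - 1)).sum := by
    unfold pvSumK
    rw [hS, Multiset.map_cons, Multiset.sum_cons]
  omega

theorem pvBS_eq (stops : Int) (gaps : List Int) (lo hi : Int) :
    pvBS stops gaps lo hi =
      if lo < hi then
        (if pvNeeded gaps (PySem.Int.floordiv (lo + hi) 2) ≤ stops then
          pvBS stops gaps lo (PySem.Int.floordiv (lo + hi) 2)
        else pvBS stops gaps (PySem.Int.floordiv (lo + hi) 2 + 1) hi)
      else lo := by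
  rw [pvBS]
  rfl

theorem pvBS_spec : ∀ (n : Nat) (stops : Int) (gaps : List Int) (lo hi : Int),
    (hi - lo).toNat = n → 1 ≤ lo → lo ≤ hi → pvNeeded gaps hi ≤ stops →
    (∀ v w, 1 ≤ v → v ≤ w → pvNeeded gaps w ≤ pvNeeded gaps v) →
    (lo ≤ pvBS stops gaps lo hi ∧ pvBS stops gaps lo hi ≤ hi ∧
    pvNeeded gaps (pvBS stops gaps lo hi) ≤ stops ∧
    ∀ v, lo ≤ v → v < pvBS stops gaps lo hi → ¬ pvNeeded gaps v ≤ stops) := by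
  intro n
  induction n using Nat.strong_induction_on with
  | _ n ih =>
  intro stops gaps lo hi hn hlo1 hlohi hhi hanti
  by_cases hlt : lo < hi
  · rw [pvBS_eq, if_pos hlt]
    have hmid := PySem.Int.floordiv_two_mid_bounds hlohi
    have hmidlt : PySem.Int.floordiv (lo + hi) 2 < hi := by
      rw [PySem.Int.floordiv_lt_iff_lt_mul (by omega)]
      omega
    by_cases hneed : pvNeeded gaps (PySem.Int.floordiv (lo + hi) 2) ≤ stops
    · rw [if_pos hneed]
      obtain ⟨r1, r2, r3, r4⟩ := ih ((PySem.Int.floordiv (lo + hi) 2 - lo).toNat)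
        (by omega) stops gaps lo (PySem.Int.floordiv (lo + hi) 2) rfl hlo1 (by omega) hneed
        hanti
      exact ⟨r1, by omega, r3, r4⟩
    · rw [if_neg hneed]
      obtain ⟨r1, r2, r3, r4⟩ := ih ((hi - (PySem.Int.floordiv (lo + hi) 2 + 1)).toNat)
        (by omega) stops gaps (PySem.Int.floordiv (lo + hi) 2 + 1) hi rfl (by omega)
        (by omega) hhi hanti
      refine ⟨by omega, r2, r3, ?_⟩
      intro v hv1 hv2 hvc
      by_cases hvm : v ≤ PySem.Int.floordiv (lo + hi) 2
      · exact hneed (le_trans (hanti v (PySem.Int.floordiv (lo + hi) 2) (by omega) hvm) hvc)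
      · exact r4 v (by omega) hv2 hvc
  · rw [pvBS_eq, if_neg hlt]
    have : lo = hi := by omega
    subst this
    exact ⟨le_refl _, le_refl _, hhi, fun v h1 h2 _ => by omega⟩
-- Layer 7: initial state and final assembly
theorem pvEntGap (g : Int) : pvGap (-1 * g, -1 * g, (1:Int)) = g := by unfold pvGap; ring
theorem pvEntVal (g : Int) : pvVal (-1 * g, -1 * g, (1:Int)) = g := by unfold pvVal; ring
theorem pvEntDiv (g : Int) : pvDiv (-1 * g, -1 * g, (1:Int)) = 1 := rfl

theorem pvNeededAnti (gaps : List Int) : ∀ v w, 1 ≤ v → v ≤ w →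
    pvNeeded gaps w ≤ pvNeeded gaps v := by
  intro v w hv hvw
  rw [pvNeeded_sum _ _ hv, pvNeeded_sum _ _ (by omega)]
  induction gaps with
  | nil => simp
  | cons a t ih =>
    rw [List.map_cons, List.map_cons, List.sum_cons, List.sum_cons]
    have hterm : (if 1 ≤ a then pvCeil a w - 1 else 0) ≤ (if 1 ≤ a then pvCeil a v - 1 else 0) := by
      by_cases h1 : (1:Int) ≤ a
      · simp only [if_pos h1]
        have := pvCeil_anti h1 (by omega : (0:Int) < v) hvw
        omega
      · simp only [if_neg h1]
        omega
    omega

theorem pvInit (G : List Int) (g0 : Int) (t : List Int) (hcons : G = g0 :: t)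
    (hmg : 1 ≤ t.foldl max g0) :
    pvInv (pvHeapify (G.map (fun i => (-1 * i, -1 * i, (1:Int))))) ∧
    pvGapsM (pvHeapify (G.map (fun i => (-1 * i, -1 * i, (1:Int))))) = (↑G : Multiset Int) ∧
    pvSumK (pvHeapify (G.map (fun i => (-1 * i, -1 * i, (1:Int))))) = 0 ∧
    pvMaxV (pvHeapify (G.map (fun i => (-1 * i, -1 * i, (1:Int))))) ≤ t.foldl max g0 := by
  obtain ⟨hl, hm, hheap⟩ := pvHeapify_spec (G.map (fun i => (-1 * i, -1 * i, (1:Int))))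
  have hlen : (pvHeapify (G.map (fun i => (-1 * i, -1 * i, (1:Int))))).length = G.length := by
    rw [hl, List.length_map]
  have hne : pvHeapify (G.map (fun i => (-1 * i, -1 * i, (1:Int)))) ≠ [] := by
    intro hc
    rw [hc] at hlen
    rw [hcons] at hlen
    simp at hlen
  have hmem : ∀ x, x ∈ pvHeapify (G.map (fun i => (-1 * i, -1 * i, (1:Int)))) ↔
      x ∈ G.map (fun i => (-1 * i, -1 * i, (1:Int))) := by
    intro x
    rw [← Multiset.mem_coe, hm, Multiset.mem_coe]
  have hwfall : ∀ e ∈ pvHeapify (G.map (fun i => (-1 * i, -1 * i, (1:Int)))), pvWF e := by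
    intro e he
    obtain ⟨g, hgG, rfl⟩ := List.mem_map.mp ((hmem e).mp he)
    exact ⟨by rw [pvEntDiv], by rw [pvEntVal, pvEntGap, pvEntDiv, pvCeil_one],
      fun _ => by rw [pvEntDiv]⟩
  have hmaxmem : t.foldl max g0 ∈ G := by
    rcases PySem.List.foldl_max_mem t g0 with he | he
    · rw [hcons, he]; exact List.mem_cons_self
    · rw [hcons]; exact List.mem_cons_of_mem _ he
  refine ⟨⟨hheap, hne, hwfall, ?_, ?_⟩, ?_, ?_, ?_⟩
  · refine ⟨(-1 * t.foldl max g0, -1 * t.foldl max g0, 1), ?_, ?_⟩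
    · exact (hmem _).mpr (List.mem_map.mpr ⟨t.foldl max g0, hmaxmem, rfl⟩)
    · rw [pvEntGap]; exact hmg
  · intro e he hd2
    obtain ⟨g, hgG, rfl⟩ := List.mem_map.mp ((hmem e).mp he)
    rw [pvEntDiv] at hd2
    omega
  · unfold pvGapsM
    rw [hm, Multiset.map_coe, List.map_map]
    have hid : G.map (pvGap ∘ fun i => (-1 * i, -1 * i, (1:Int))) = G := by
      conv_rhs => rw [← List.map_id G]
      exact List.map_congr_left (fun a _ => pvEntGap a)
    rw [hid]
  · unfold pvSumK
    rw [hm, Multiset.map_coe, List.map_map]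
    have hzero : ∀ x ∈ G.map ((fun e => pvDiv e - 1) ∘ fun i => (-1 * i, -1 * i, (1:Int))),
        x = 0 := by
      intro x hx
      obtain ⟨g, hgG, rfl⟩ := List.mem_map.mp hx
      show pvDiv (-1 * g, -1 * g, (1:Int)) - 1 = 0
      rw [pvEntDiv]
      omega
    rw [Multiset.sum_coe]
    exact List.sum_eq_zero hzero
  · have hroot := pvRootMem _ hne
    obtain ⟨g, hgG, hge⟩ := List.mem_map.mp ((hmem _).mp hroot)
    unfold pvMaxV
    rw [← hge, pvEntVal]
    rw [hcons] at hgG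
    rcases List.mem_cons.mp hgG with h0 | h0
    · rw [h0]; exact (PySem.List.le_foldl_max t g0).1
    · exact (PySem.List.le_foldl_max t g0).2 g h0
-- Layer 8: the verdict
theorem pvMain (n m l : Int) (d : List Int) (hpre : Pre_solution n m l d) :
    solution n m l d = solution_alt n m l d := by
  obtain ⟨hdne, hmg⟩ := hpre
  simp only [solution, solution_alt]
  have hfold : (List.range ((PySem.List.sorted d (fun x => x) false).length - 1)).foldl
      (fun acc i => acc ++ [(PySem.List.sorted d (fun x => x) false).getD (i + 1) 0 -
        (PySem.List.sorted d (fun x => x) false).getD i 0])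
      [(PySem.List.sorted d (fun x => x) false).headD 0,
        l - (PySem.List.sorted d (fun x => x) false).getLastD 0] = pvGaps l d := by
    rw [PySem.List.foldl_append_singleton_eq_map]
    rfl
  rw [hfold]
  have hGB : ([(PySem.List.sorted d (fun x => x) false).headD 0,
      l - (PySem.List.sorted d (fun x => x) false).getLastD 0] ++
      (List.range ((PySem.List.sorted d (fun x => x) false).length - 1)).map
        (fun i => (PySem.List.sorted d (fun x => x) false).getD (i + 1) 0 -
          (PySem.List.sorted d (fun x => x) false).getD i 0)) = pvGaps l d := rfl
  rw [hGB]
  have hcons : pvGaps l d = (PySem.List.sorted d (fun x => x) false).headD 0 ::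
      ((l - (PySem.List.sorted d (fun x => x) false).getLastD 0) ::
      (List.range ((PySem.List.sorted d (fun x => x) false).length - 1)).map
        (fun i => (PySem.List.sorted d (fun x => x) false).getD (i + 1) 0 -
          (PySem.List.sorted d (fun x => x) false).getD i 0)) := rfl
  have hMGfold : pvMaxGap l d = ((l - (PySem.List.sorted d (fun x => x) false).getLastD 0) ::
      (List.range ((PySem.List.sorted d (fun x => x) false).length - 1)).map
        (fun i => (PySem.List.sorted d (fun x => x) false).getD (i + 1) 0 -
          (PySem.List.sorted d (fun x => x) false).getD i 0)).foldl max
        ((PySem.List.sorted d (fun x => x) false).headD 0) := by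
    unfold pvMaxGap
    rw [hcons]
  have hmax : (PySem.List.max? (pvGaps l d) (fun x => x)).getD 0 = pvMaxGap l d := by
    rw [hcons, PySem.List.max?_id_cons, hMGfold]
    rfl
  rw [hmax]
  -- initial state
  obtain ⟨hinv0, hgaps0, hsum0, hmax0⟩ := pvInit (pvGaps l d) _ _ hcons (by rw [← hMGfold]; exact hmg)
  rw [← hMGfold] at hmax0
  -- run the loop
  obtain ⟨hinvH, hgapsH, hsumH, hmaxH⟩ := pvLoopA_spec m.toNat _ hinv0
  rw [hgaps0] at hgapsH
  rw [hsum0, zero_add] at hsumH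
  -- A's answer is the maximal current distance
  obtain ⟨hheapH, hneH, -, -, -⟩ := id hinvH
  have hA : -1 * (pvHeappop (pvLoopA m.toNat (pvHeapify ((pvGaps l d).map
      (fun i => (-1 * i, -1 * i, 1)))))).1.1 =
      pvMaxV (pvLoopA m.toNat (pvHeapify ((pvGaps l d).map (fun i => (-1 * i, -1 * i, 1))))) := by
    rw [(pvHeappop_spec _ hneH hheapH).1]
    unfold pvMaxV pvVal
    ring
  rw [hA]
  -- identities about stops
  have hstops : max m 0 = (m.toNat : Int) := by omega
  have hstopsum : pvSumK (pvLoopA m.toNat (pvHeapify ((pvGaps l d).map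
      (fun i => (-1 * i, -1 * i, 1))))) = max m 0 := by rw [hsumH, hstops]
  -- the predicate holds at the top of the search range
  have hM1 : 1 ≤ pvMaxGap l d := hmg
  have hneedM : pvNeeded (pvGaps l d) (pvMaxGap l d) ≤ max m 0 := by
    rw [pvNeeded_sum _ _ hM1]
    have hz : ∀ x ∈ (pvGaps l d).map
        (fun g => if 1 ≤ g then pvCeil g (pvMaxGap l d) - 1 else 0), x = 0 := by
      intro x hx
      obtain ⟨g, hgG, rfl⟩ := List.mem_map.mp hx
      by_cases h1 : (1:Int) ≤ g
      · simp only [if_pos h1]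
        have hle : g ≤ pvMaxGap l d := by
          rw [hcons] at hgG
          rw [hMGfold]
          rcases List.mem_cons.mp hgG with h0 | h0
          · rw [h0]; exact (PySem.List.le_foldl_max _ _).1
          · exact (PySem.List.le_foldl_max _ _).2 g h0
        have hc1 : pvCeil g (pvMaxGap l d) ≤ 1 := by
          rw [pvCeil_le_iff (by omega)]
          omega
        have hc2 : 1 ≤ pvCeil g (pvMaxGap l d) := (pvCeil_pos_iff (by omega)).mpr h1
        omega
      · simp only [if_neg h1]
    rw [List.sum_eq_zero hz]
    omega
  -- A's value satisfies the predicate …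
  have hneedV : pvNeeded (pvGaps l d)
      (pvMaxV (pvLoopA m.toNat (pvHeapify ((pvGaps l d).map
        (fun i => (-1 * i, -1 * i, 1)))))) ≤ max m 0 := by
    rw [← hstopsum]
    exact pvIneq1 _ hinvH _ hgapsH
  have hV1 : 1 ≤ pvMaxV (pvLoopA m.toNat (pvHeapify ((pvGaps l d).map
      (fun i => (-1 * i, -1 * i, 1))))) := pvMaxV_pos _ hinvH
  have hVM : pvMaxV (pvLoopA m.toNat (pvHeapify ((pvGaps l d).map
      (fun i => (-1 * i, -1 * i, 1))))) ≤ pvMaxGap l d := le_trans hmaxH hmax0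
  -- … and the binary search computes exactly the least such value
  obtain ⟨r1, r2, r3, r4⟩ := pvBS_spec ((pvMaxGap l d - 1).toNat) (max m 0) (pvGaps l d)
    1 (pvMaxGap l d) rfl (le_refl _) hM1 hneedM (pvNeededAnti _)
  have hrV : pvBS (max m 0) (pvGaps l d) 1 (pvMaxGap l d) ≤
      pvMaxV (pvLoopA m.toNat (pvHeapify ((pvGaps l d).map (fun i => (-1 * i, -1 * i, 1))))) := by
    by_contra hc
    rw [not_le] at hc
    exact r4 _ hV1 hc hneedV
  have hVr : pvMaxV (pvLoopA m.toNat (pvHeapify ((pvGaps l d).map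
      (fun i => (-1 * i, -1 * i, 1))))) ≤ pvBS (max m 0) (pvGaps l d) 1 (pvMaxGap l d) := by
    apply pvIneq2 _ hinvH _ hgapsH _ r1
    rw [hstopsum]
    exact r3
  omega

-- ===== VERDICT (by name: the statement is the Claim_ definition above) =====
theorem solution_spec : Claim_equal_solution := by
  intro n m l d _ hpre
  exact pvMain n m l d hpre
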